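-- pv_equiv track=rewrite | github.com/SSAFYnity/Job-Preparation-Challenge-3rd | Programmers/인사고과/인사고과_최형오.py | solution
-- ===== SOURCE A (Python) =====
-- def solution(scores):
--     answer = 1
--
--     target_a, target_b = scores[0]
--     target_sum = target_a + target_b
--
--     scores.sort(key = lambda x: (-x[0], x[1]))
--     max_b = 0
--
--     for a, b in scores:
--         if target_a < a and target_b < b:
--             return -1
--
--         if target_sum < a + b and max_b <= b:
--             max_b = b
--             answer += 1
--
--     return answer
-- ===== SOURCE B (Python) =====
-- def solution(scores):
--     target_a, target_b = scores[0]
--     target_sum = target_a + target_b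
--     if any(target_a < a and target_b < b for a, b in scores):
--         return -1
--     return 1 + sum(1 for a, b in scores
--                    if target_sum < a + b
--                    and not any(a < oa and b < ob for oa, ob in scores))
-- ===== Notes on version B (the rewrite author's own statement) =====
-- stated objective: simpler
-- what changed: B drops A's in-place sort and running max_b staircase and instead does one domination pass plus one counting pass that counts each employee with score sum above employee 0's that no other employee strictly dominates (A also mutates scores via sort; B does not).
-- intended difference: On inputs where nobody strictly dominates employee 0 but some employee has score sum above employee 0's, a negative second score and no strict dominator, A fails to count that employee because its running maximum starts at the sentinel 0, while B counts every non-dominated higher-sum employee; B's value is the intended rank. — e.g. on solution([[0, 0], [5, -4]]): A returns 1, B returns 2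
import Mathlib
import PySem

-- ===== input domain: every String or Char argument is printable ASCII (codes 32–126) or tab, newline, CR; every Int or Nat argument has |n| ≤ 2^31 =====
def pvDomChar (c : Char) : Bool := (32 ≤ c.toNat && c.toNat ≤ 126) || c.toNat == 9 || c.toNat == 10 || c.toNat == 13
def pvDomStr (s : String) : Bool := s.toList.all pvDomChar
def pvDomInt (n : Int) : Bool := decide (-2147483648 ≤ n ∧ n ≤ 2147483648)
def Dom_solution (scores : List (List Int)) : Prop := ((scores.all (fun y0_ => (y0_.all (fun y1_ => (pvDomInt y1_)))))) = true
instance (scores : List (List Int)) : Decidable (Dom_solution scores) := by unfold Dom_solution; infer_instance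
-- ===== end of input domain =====

-- B drops A's sort-and-staircase and counts each higher-sum employee that no other employee
-- strictly dominates (objective: simpler; NOT faster — O(n^2) vs O(n log n)).
-- A sorts `scores` in place, B does not mutate it; the equivalence proved is about the return value.

-- ===== PORT A =====
-- x[0] / x[1] of a row (every row is a pair under Pre_; Python raises IndexError on shorter rows)
def rowA (r : List Int) : Int := PySem.List.pyGetD r 0 0
def rowB (r : List Int) : Int := PySem.List.pyGetD r 1 0

-- A's for-loop: early `return -1`, state (max_b, answer)
def loopA (ta tb ts : Int) : List (List Int) → Int → Int → Int
  | [], _, answer => answer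
  | r :: rest, maxb, answer =>
    match r with
    | [a, b] =>
      if ta < a ∧ tb < b then -1
      else if ts < a + b ∧ maxb ≤ b then loopA ta tb ts rest b (answer + 1)
      else loopA ta tb ts rest maxb answer
    | _ => loopA ta tb ts rest maxb answer  -- Python: ValueError unpacking `a, b`; outside Pre_

def solution (scores : List (List Int)) : Int :=
  match scores with
  | (ta :: tb :: []) :: _ =>
    let ts := ta + tb
    -- scores.sort(key = lambda x: (-x[0], x[1]))
    let s := PySem.List.sorted2 scores (fun x => -(rowA x)) (fun x => rowB x)
    loopA ta tb ts s 0 1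
  | _ => 0  -- Python: `target_a, target_b = scores[0]` raises (IndexError/ValueError); outside Pre_

-- ===== PORT B =====
def solution_alt (scores : List (List Int)) : Int :=
  match scores with
  | (ta :: tb :: []) :: _ =>
    let ts := ta + tb
    if scores.any (fun r => decide (ta < rowA r) && decide (tb < rowB r)) then -1
    else
      1 + (scores.countP (fun r =>
            decide (ts < rowA r + rowB r) &&
            !(scores.any (fun q => decide (rowA r < rowA q) && decide (rowB r < rowB q)))) : Int)
  | _ => 0  -- Python raises on the unpack of scores[0]; outside Pre_

-- ===== PRECONDITION & SPEC =====
-- exactly where the Python A returns: scores nonempty and every row an [a, b] pair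
-- (otherwise `scores[0]`, the sort key or the loop's unpacking raises IndexError/ValueError)
def Pre_solution (scores : List (List Int)) : Prop :=
  scores ≠ [] ∧ ∀ r ∈ scores, r.length = 2
instance (scores : List (List Int)) : Decidable (Pre_solution scores) := by
  unfold Pre_solution; infer_instance

def pvWitness_solution : List (List Int) := [[2, 2], [1, 4], [3, 2]]

-- r is strictly dominated by nobody in scores (both coordinates strictly larger)
def pvUndom (scores : List (List Int)) (r : List Int) : Prop :=
  ∀ q ∈ scores, ¬(rowA r < rowA q ∧ rowB r < rowB q)
-- On inputs where nobody strictly dominates employee 0 but some employee has score sum above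
-- employee 0's, a negative second score and no strict dominator, A fails to count that employee
-- (its running maximum starts at the sentinel 0) while B counts every non-dominated higher-sum
-- employee; B's value is the intended rank.
def D_solution (scores : List (List Int)) : Prop :=
  ∃ h ∈ scores.take 1, pvUndom scores h ∧
    ∃ r ∈ scores, rowA h + rowB h < rowA r + rowB r ∧ rowB r < 0 ∧ pvUndom scores r
instance (scores : List (List Int)) : Decidable (D_solution scores) := by
  unfold D_solution pvUndom; infer_instance

def Spec_solution (scores : List (List Int)) (out : Int) : Prop :=
  ¬ D_solution scores → out = solution_alt scores
instance (scores : List (List Int)) (out : Int) : Decidable (Spec_solution scores out) := by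
  unfold Spec_solution; infer_instance

def pvDiffWitness_solution : List (List Int) := [[0, 0], [5, -4]]
def pvDiffWitnessOut_solution : Int × Int := (1, 2)

-- ===== CLAIM (what is proved, stated in full; the proofs are below) =====
def Claim_unchanged_solution : Prop := ∀ (scores : List (List Int)), Dom_solution scores → Pre_solution scores → Spec_solution scores (solution scores)
def Claim_changed_solution : Prop := Dom_solution (pvDiffWitness_solution) ∧ Pre_solution (pvDiffWitness_solution) ∧ D_solution (pvDiffWitness_solution) ∧ solution (pvDiffWitness_solution) = pvDiffWitnessOut_solution.1 ∧ solution_alt (pvDiffWitness_solution) = pvDiffWitnessOut_solution.2 ∧ pvDiffWitnessOut_solution.1 ≠ pvDiffWitnessOut_solution.2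
def Claim_exact_solution : Prop := ∀ (scores : List (List Int)), Dom_solution scores → Pre_solution scores → D_solution scores → solution scores ≠ solution_alt scores

-- ===== LEMMAS AND PROOFS =====

-- best b among rows with a' strictly larger than a and sum above ts (A's staircase value, proof-only)
def bestB (ts a : Int) (scores : List (List Int)) : Int :=
  (scores.filterMap (fun q =>
    if a < rowA q ∧ ts < rowA q + rowB q then some (rowB q) else none)).foldl max 0

-- the order produced by A's sort key (-x[0], x[1]): a descending, ties b ascending
def Rle (p q : List Int) : Prop := rowA q < rowA p ∨ (rowA p = rowA q ∧ rowB p ≤ rowB q)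

-- b-value of a row qualifying by sum (the rows on which A's staircase moves)
def qualB (ts : Int) (r : List Int) : Option Int :=
  if ts < rowA r + rowB r then some (rowB r) else none

-- value of A's max_b after processing a prefix
def Mmax (ts : Int) (pr : List (List Int)) : Int := (pr.filterMap (qualB ts)).foldl max 0

-- A's counting, isolated from the early return
def cnt (ts : Int) : List (List Int) → Int → Int
  | [], _ => 0
  | r :: rest, maxb =>
    match r with
    | [a, b] => if ts < a + b ∧ maxb ≤ b then cnt ts rest b + 1 else cnt ts rest maxb
    | _ => cnt ts rest maxb

lemma rowA_pair (a b : Int) : rowA [a, b] = a := by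
  simp [rowA, PySem.List.pyGetD]

lemma rowB_pair (a b : Int) : rowB [a, b] = b := by
  simp [rowB, PySem.List.pyGetD]

lemma loopA_neg (ta tb ts : Int) :
    ∀ (l : List (List Int)) (maxb ans : Int),
      (∃ r ∈ l, ∃ a b : Int, r = [a, b] ∧ ta < a ∧ tb < b) →
      loopA ta tb ts l maxb ans = -1 := by
  intro l
  induction l with
  | nil => rintro _ _ ⟨r, hr, _⟩; simp at hr
  | cons r rest ih =>
    rintro maxb ans ⟨r', hr', a, b, hab, h1, h2⟩
    rcases List.mem_cons.mp hr' with h | h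
    · subst h; subst hab
      simp [loopA, h1, h2]
    · match r with
      | [a', b'] =>
        by_cases hd : ta < a' ∧ tb < b'
        · simp [loopA, hd]
        · simp only [loopA, if_neg hd]
          split <;> exact ih _ _ ⟨r', h, a, b, hab, h1, h2⟩
      | [] => exact ih _ _ ⟨r', h, a, b, hab, h1, h2⟩
      | [x] => exact ih _ _ ⟨r', h, a, b, hab, h1, h2⟩
      | (x :: y :: z :: t) => exact ih _ _ ⟨r', h, a, b, hab, h1, h2⟩

lemma loopA_cnt (ta tb ts : Int) :
    ∀ (l : List (List Int)) (maxb ans : Int),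
      (∀ r ∈ l, ∀ a b : Int, r = [a, b] → ¬(ta < a ∧ tb < b)) →
      loopA ta tb ts l maxb ans = ans + cnt ts l maxb := by
  intro l
  induction l with
  | nil => intro maxb ans _; simp [loopA, cnt]
  | cons r rest ih =>
    intro maxb ans hnd
    have hrest : ∀ r' ∈ rest, ∀ a b : Int, r' = [a, b] → ¬(ta < a ∧ tb < b) :=
      fun r' h => hnd r' (List.mem_cons_of_mem _ h)
    match r with
    | [a, b] =>
      have hd : ¬(ta < a ∧ tb < b) := hnd [a, b] List.mem_cons_self a b rfl
      by_cases hc : ts < a + b ∧ maxb ≤ b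
      · simp only [loopA, cnt, if_neg hd, if_pos hc]
        rw [ih _ _ hrest]; ring
      · simp only [loopA, cnt, if_neg hd, if_neg hc]
        exact ih _ _ hrest
    | [] => simp only [loopA, cnt]; exact ih _ _ hrest
    | [x] => simp only [loopA, cnt]; exact ih _ _ hrest
    | (x :: y :: z :: t) => simp only [loopA, cnt]; exact ih _ _ hrest

lemma foldl_max_le_iff (l : List Int) (b : Int) :
    l.foldl max 0 ≤ b ↔ 0 ≤ b ∧ ∀ y ∈ l, y ≤ b := by
  constructor
  · intro h
    exact ⟨le_trans (PySem.List.le_foldl_max l 0).1 h,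
      fun y hy => le_trans ((PySem.List.le_foldl_max l 0).2 y hy) h⟩
  · rintro ⟨h0, hall⟩
    rcases PySem.List.foldl_max_mem l 0 with h | h
    · omega
    · exact hall _ h

lemma foldl_insertBy_pairwise {κ : Type} [LinearOrder κ] (key : List Int → κ) :
    ∀ (xs acc : List (List Int)),
      acc.Pairwise (fun p q => key p ≤ key q) →
      (xs.foldl (fun acc x => PySem.List.insertBy (fun a b => decide (key a < key b)) x acc) acc).Pairwise
        (fun p q => key p ≤ key q) := by
  intro xs
  induction xs with
  | nil => intro acc h; simpa using h
  | cons x t ih =>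
    intro acc h
    simpa [List.foldl_cons] using ih _ (PySem.List.insertBy_pairwise_le key x acc h)

lemma sorted2_pairwise (xs : List (List Int)) (k1 k2 : List Int → Int) :
    (PySem.List.sorted2 xs k1 k2 false).Pairwise
      (fun p q => k1 p < k1 q ∨ (k1 p = k1 q ∧ k2 p ≤ k2 q)) := by
  have hbef : (fun (a b : List Int) => decide (k1 a < k1 b) || (!decide (k1 b < k1 a) && decide (k2 a < k2 b)))
      = fun a b => decide ((toLex (k1 a, k2 a) : Lex (Int × Int)) < toLex (k1 b, k2 b)) := by
    funext a b
    simp only [Prod.Lex.toLex_lt_toLex]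
    by_cases h1 : k1 a < k1 b
    · simp [h1]
    · by_cases h2 : k1 b < k1 a
      · have hne : ¬(k1 a = k1 b) := by omega
        simp [h1, h2, hne]
      · have he : k1 a = k1 b := le_antisymm (not_lt.mp h2) (not_lt.mp h1)
        simp [he]
  have hrw : PySem.List.sorted2 xs k1 k2 false
      = xs.foldl (fun acc x => PySem.List.insertBy (fun a b => decide ((toLex (k1 a, k2 a) : Lex (Int × Int)) < toLex (k1 b, k2 b))) x acc) [] := by
    simp only [PySem.List.sorted2, Bool.false_eq_true, if_false]
    rw [hbef]
  rw [hrw]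
  have h := foldl_insertBy_pairwise (fun x => (toLex (k1 x, k2 x) : Lex (Int × Int))) xs [] (by simp)
  refine h.imp ?_
  intro p q hle
  rcases Prod.Lex.toLex_le_toLex.mp hle with h' | h'
  · exact Or.inl h'
  · exact Or.inr h'

-- the heart: over the sorted list, A's running max_b test equals the direct threshold test
lemma cnt_countP (ts : Int) (s : List (List Int))
    (hsh : ∀ r ∈ s, ∃ a b : Int, r = [a, b])
    (hp : s.Pairwise Rle) :
    ∀ (l pr : List (List Int)), s = pr ++ l →
      cnt ts l (Mmax ts pr) =
        (l.countP (fun r => decide (ts < rowA r + rowB r) && decide (bestB ts (rowA r) s ≤ rowB r)) : Int) := by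
  intro l
  induction l with
  | nil => intro pr _; simp [cnt]
  | cons r rest ih =>
    intro pr hseq
    have hrs : r ∈ s := by rw [hseq]; exact List.mem_append_right _ List.mem_cons_self
    obtain ⟨a, b, rfl⟩ := hsh r hrs
    have hp' := hp
    rw [hseq] at hp'
    obtain ⟨-, hpc, hcross⟩ := List.pairwise_append.mp hp'
    obtain ⟨hr_rest, -⟩ := List.pairwise_cons.mp hpc
    have hpr_r : ∀ q ∈ pr, Rle q [a, b] := fun q hq => hcross q hq _ List.mem_cons_self
    -- the crux: running max over the prefix vs direct threshold over the whole list
    have hiff : Mmax ts pr ≤ b ↔ bestB ts a s ≤ b := by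
      unfold Mmax bestB
      rw [foldl_max_le_iff, foldl_max_le_iff]
      refine and_congr_right fun h0 => ?_
      constructor
      · intro hM y hy
        rw [List.mem_filterMap] at hy
        obtain ⟨q, hqs, hfq⟩ := hy
        by_cases hcond : a < rowA q ∧ ts < rowA q + rowB q
        · rw [if_pos hcond] at hfq
          have hy' : y = rowB q := (Option.some_inj.mp hfq).symm
          subst hy'
          rw [hseq] at hqs
          rcases List.mem_append.mp hqs with hq | hq
          · exact hM _ (List.mem_filterMap.mpr ⟨q, hq, by simp [qualB, hcond.2]⟩)
          · exfalso
            rcases List.mem_cons.mp hq with rfl | hq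
            · rw [rowA_pair] at hcond; omega
            · have := hr_rest q hq
              unfold Rle at this
              rw [rowA_pair, rowB_pair] at this
              omega
        · rw [if_neg hcond] at hfq; exact absurd hfq (by simp)
      · intro hB y hy
        rw [List.mem_filterMap] at hy
        obtain ⟨q, hq, hfq⟩ := hy
        unfold qualB at hfq
        by_cases hcond : ts < rowA q + rowB q
        · rw [if_pos hcond] at hfq
          have hy' : y = rowB q := (Option.some_inj.mp hfq).symm
          subst hy'
          have hqr := hpr_r q hq
          unfold Rle at hqr
          rw [rowA_pair, rowB_pair] at hqr
          rcases hqr with hlt | ⟨heq, hle⟩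
          · refine hB _ (List.mem_filterMap.mpr ⟨q, ?_, ?_⟩)
            · rw [hseq]; exact List.mem_append_left _ hq
            · rw [if_pos ⟨hlt, hcond⟩]
          · exact hle
        · rw [if_neg hcond] at hfq; exact absurd hfq (by simp)
    have hseq' : s = (pr ++ [[a, b]]) ++ rest := by rw [hseq, List.append_assoc]; rfl
    rw [List.countP_cons]
    by_cases hq : ts < a + b
    · have hMapp : Mmax ts (pr ++ [[a, b]]) = max (Mmax ts pr) b := by
        unfold Mmax
        rw [List.filterMap_append, List.foldl_append]
        simp only [qualB, rowA_pair, rowB_pair, if_pos hq, List.filterMap_cons,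
          List.filterMap_nil, List.foldl_cons, List.foldl_nil]
      by_cases hm : Mmax ts pr ≤ b
      · -- counted: max_b becomes b
        have hM' : Mmax ts (pr ++ [[a, b]]) = b := by rw [hMapp]; exact max_eq_right hm
        have hcount : (decide (ts < rowA [a,b] + rowB [a,b]) && decide (bestB ts (rowA [a,b]) s ≤ rowB [a,b])) = true := by
          rw [rowA_pair, rowB_pair]
          simp [hq, hiff.mp hm]
        show (if ts < a + b ∧ Mmax ts pr ≤ b then cnt ts rest b + 1 else cnt ts rest (Mmax ts pr)) = _
        rw [if_pos ⟨hq, hm⟩, hcount, if_pos rfl]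
        have := ih (pr ++ [[a, b]]) hseq'
        rw [hM'] at this
        rw [this]
        push_cast; ring
      · -- qualifying but below the staircase
        have hM' : Mmax ts (pr ++ [[a, b]]) = Mmax ts pr := by
          rw [hMapp]; exact max_eq_left (le_of_lt (lt_of_not_ge hm))
        have hcount : (decide (ts < rowA [a,b] + rowB [a,b]) && decide (bestB ts (rowA [a,b]) s ≤ rowB [a,b])) = false := by
          rw [rowA_pair, rowB_pair]
          have hnb : ¬ bestB ts a s ≤ b := fun h => hm (hiff.mpr h)
          simp [hnb]
        show (if ts < a + b ∧ Mmax ts pr ≤ b then cnt ts rest b + 1 else cnt ts rest (Mmax ts pr)) = _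
        rw [if_neg (by tauto), hcount, if_neg Bool.false_ne_true]
        have := ih (pr ++ [[a, b]]) hseq'
        rw [hM'] at this
        rw [this]
        push_cast; ring
    · -- not qualifying
      have hM' : Mmax ts (pr ++ [[a, b]]) = Mmax ts pr := by
        unfold Mmax
        rw [List.filterMap_append, List.foldl_append]
        simp only [qualB, rowA_pair, rowB_pair, if_neg hq, List.filterMap_cons,
          List.filterMap_nil, List.foldl_nil]
      have hcount : (decide (ts < rowA [a,b] + rowB [a,b]) && decide (bestB ts (rowA [a,b]) s ≤ rowB [a,b])) = false := by
        rw [rowA_pair, rowB_pair]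
        simp [hq]
      show (if ts < a + b ∧ Mmax ts pr ≤ b then cnt ts rest b + 1 else cnt ts rest (Mmax ts pr)) = _
      rw [if_neg (by tauto), hcount, if_neg Bool.false_ne_true]
      have := ih (pr ++ [[a, b]]) hseq'
      rw [hM'] at this
      rw [this]
      push_cast; ring

-- A's staircase test in terms of the input: nonnegative b and no strict dominator
lemma bestB_le_iff (ts a b : Int) (scores : List (List Int)) (hq : ts < a + b) :
    bestB ts a scores ≤ b ↔
      0 ≤ b ∧ ∀ q ∈ scores, ¬(a < rowA q ∧ b < rowB q) := by
  unfold bestB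
  rw [foldl_max_le_iff]
  refine and_congr_right fun _ => ?_
  constructor
  · intro h q hqs hdom
    have hsum : ts < rowA q + rowB q := by omega
    have := h (rowB q) (List.mem_filterMap.mpr ⟨q, hqs, by rw [if_pos ⟨hdom.1, hsum⟩]⟩)
    omega
  · intro h y hy
    rw [List.mem_filterMap] at hy
    obtain ⟨q, hqs, hfq⟩ := hy
    by_cases hcond : a < rowA q ∧ ts < rowA q + rowB q
    · rw [if_pos hcond] at hfq
      have : y = rowB q := (Option.some_inj.mp hfq).symm
      subst this
      have := h q hqs
      omega
    · rw [if_neg hcond] at hfq; exact absurd hfq (by simp)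

-- solution on a dominator-free pair list, as a direct count against bestB
lemma solution_eq_count (ta tb : Int) (tl : List (List Int))
    (hsh : ∀ r ∈ ([ta, tb] :: tl), ∃ a b : Int, r = [a, b])
    (hnod : ∀ r ∈ ([ta, tb] :: tl), ¬(ta < rowA r ∧ tb < rowB r)) :
    solution ([ta, tb] :: tl) =
      1 + ((([ta, tb] :: tl)).countP (fun r =>
        decide (ta + tb < rowA r + rowB r) &&
        decide (bestB (ta + tb) (rowA r) ([ta, tb] :: tl) ≤ rowB r)) : Int) := by
  set S : List (List Int) := [ta, tb] :: tl with hS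
  show loopA ta tb (ta + tb)
      (PySem.List.sorted2 S (fun x => -(rowA x)) (fun x => rowB x)) 0 1 = _
  set s : List (List Int) := PySem.List.sorted2 S (fun x => -(rowA x)) (fun x => rowB x) with hs
  have hperm : s.Perm S := PySem.List.sorted2_perm S _ _ false
  have hshs : ∀ r ∈ s, ∃ a b : Int, r = [a, b] := fun r hr => hsh r (hperm.mem_iff.mp hr)
  have hpair : s.Pairwise Rle := by
    have h := sorted2_pairwise S (fun x => -(rowA x)) (fun x => rowB x)
    refine h.imp ?_
    intro p q h'
    unfold Rle
    rcases h' with h' | ⟨h1, h2⟩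
    · left; omega
    · right; exact ⟨by omega, h2⟩
  have hnd : ∀ r ∈ s, ∀ a b : Int, r = [a, b] → ¬(ta < a ∧ tb < b) := by
    intro r hr a b hab hdom
    have := hnod r (hperm.mem_iff.mp hr)
    subst hab
    rw [rowA_pair, rowB_pair] at this
    exact this hdom
  rw [loopA_cnt ta tb (ta + tb) s 0 1 hnd]
  have h0 : Mmax (ta + tb) ([] : List (List Int)) = 0 := rfl
  rw [← h0, cnt_countP (ta + tb) s hshs hpair s [] (by simp)]
  have hbest : ∀ a', bestB (ta + tb) a' s = bestB (ta + tb) a' S :=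
    fun a' => List.Perm.foldl_eq (hperm.filterMap _) 0
  simp only [hbest]
  rw [(hperm.countP_eq _)]

-- strict countP monotonicity, for the tight claim
lemma countP_lt_of_witness (p q : List Int → Bool) :
    ∀ (l : List (List Int)), (∀ x ∈ l, p x = true → q x = true) →
      (∃ x ∈ l, q x = true ∧ p x = false) →
      l.countP p < l.countP q := by
  intro l
  induction l with
  | nil => rintro _ ⟨x, hx, _⟩; simp at hx
  | cons x t ih =>
    rintro himp ⟨w, hw, hqw, hpw⟩
    have himpt : ∀ y ∈ t, p y = true → q y = true :=
      fun y hy => himp y (List.mem_cons_of_mem _ hy)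
    have hmono : t.countP p ≤ t.countP q := List.countP_mono_left himpt
    rw [List.countP_cons, List.countP_cons]
    rcases List.mem_cons.mp hw with rfl | hwt
    · rw [hpw, hqw]
      simp
      omega
    · have hlt := ih himpt ⟨w, hwt, hqw, hpw⟩
      by_cases hpx : p x = true
      · rw [hpx, himp x List.mem_cons_self hpx]
        omega
      · rw [Bool.not_eq_true] at hpx
        rw [hpx]
        by_cases hqx : q x = true
        · rw [hqx]
          simp
          omega
        · rw [Bool.not_eq_true] at hqx
          rw [hqx]
          omega

-- shape of the rows under Pre_
lemma rows_pairs (scores : List (List Int)) (hlen : ∀ r ∈ scores, r.length = 2) :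
    ∀ r ∈ scores, ∃ a b : Int, r = [a, b] := by
  intro r hr
  have hl := hlen r hr
  match r with
  | [a, b] => exact ⟨a, b, rfl⟩
  | [] => simp at hl
  | [x] => simp at hl
  | x :: y :: z :: t => exact absurd hl (by simp)

-- ===== VERDICT (by name: the statements are the Claim_ definitions above) =====
theorem solution_spec : Claim_unchanged_solution := by
  intro scores _hdom hpre hnD
  obtain ⟨hne, hlen⟩ := hpre
  have hsh := rows_pairs scores hlen
  obtain ⟨r0, tl, rfl⟩ : ∃ r0 tl, scores = r0 :: tl := by
    cases scores with
    | nil => exact absurd rfl hne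
    | cons r0 tl => exact ⟨r0, tl, rfl⟩
  obtain ⟨ta, tb, rfl⟩ := hsh _ List.mem_cons_self
  by_cases hany : ([ta, tb] :: tl).any (fun r => decide (ta < rowA r) && decide (tb < rowB r))
  · -- some employee strictly dominates employee 0: both sides return -1
    obtain ⟨r, hr, hpr⟩ := List.any_eq_true.mp hany
    obtain ⟨a, b, rfl⟩ := hsh r hr
    rw [rowA_pair, rowB_pair] at hpr
    simp only [Bool.and_eq_true, decide_eq_true_eq] at hpr
    show loopA ta tb (ta + tb)
        (PySem.List.sorted2 ([ta, tb] :: tl) (fun x => -(rowA x)) (fun x => rowB x)) 0 1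
      = solution_alt ([ta, tb] :: tl)
    have hperm := PySem.List.sorted2_perm ([ta, tb] :: tl) (fun x => -(rowA x)) (fun x => rowB x) false
    rw [loopA_neg ta tb (ta + tb) _ 0 1 ⟨[a, b], hperm.mem_iff.mpr hr, a, b, rfl, hpr.1, hpr.2⟩]
    rw [show solution_alt ([ta, tb] :: tl) = -1 by simp only [solution_alt]; rw [if_pos hany]]
  · -- nobody dominates employee 0
    have hnod : ∀ r ∈ ([ta, tb] :: tl), ¬(ta < rowA r ∧ tb < rowB r) := by
      intro r hr hdom
      exact hany (List.any_eq_true.mpr ⟨r, hr, by simp [hdom.1, hdom.2]⟩)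
    -- ¬D_ now means: every higher-sum non-dominated row has a nonnegative second score
    have hkey : ∀ r ∈ ([ta, tb] :: tl), ta + tb < rowA r + rowB r →
        (∀ q ∈ ([ta, tb] :: tl), ¬(rowA r < rowA q ∧ rowB r < rowB q)) → 0 ≤ rowB r := by
      intro r hr hsum hnodom
      by_contra hneg
      refine hnD ⟨[ta, tb], by simp, ?_, r, hr, ?_, by omega, hnodom⟩
      · intro q hq
        simpa [pvUndom, rowA_pair, rowB_pair] using hnod q hq
      · simpa [rowA_pair, rowB_pair] using hsum
    unfold Spec_solution at *
    rw [solution_eq_count ta tb tl hsh hnod]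
    rw [show solution_alt ([ta, tb] :: tl) = 1 + (([ta, tb] :: tl).countP (fun r =>
          decide (ta + tb < rowA r + rowB r) &&
          !(([ta, tb] :: tl).any (fun q => decide (rowA r < rowA q) && decide (rowB r < rowB q)))) : Int) by
        simp only [solution_alt]; rw [if_neg hany]]
    congr 2
    refine List.countP_congr ?_
    intro r hr
    by_cases hsum : ta + tb < rowA r + rowB r
    · have hiff := bestB_le_iff (ta + tb) (rowA r) (rowB r) ([ta, tb] :: tl) hsum
      by_cases hdom : ∀ q ∈ ([ta, tb] :: tl), ¬(rowA r < rowA q ∧ rowB r < rowB q)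
      · have h0 : 0 ≤ rowB r := hkey r hr hsum hdom
        have hb : bestB (ta + tb) (rowA r) ([ta, tb] :: tl) ≤ rowB r := hiff.mpr ⟨h0, hdom⟩
        have hnoany : ([ta, tb] :: tl).any (fun q => decide (rowA r < rowA q) && decide (rowB r < rowB q)) = false := by
          rw [Bool.eq_false_iff]
          intro hc
          obtain ⟨q, hq, hqc⟩ := List.any_eq_true.mp hc
          simp only [Bool.and_eq_true, decide_eq_true_eq] at hqc
          exact hdom q hq hqc
        simp [hsum, hb, hnoany]
      · rw [not_forall] at hdom
        simp only [not_forall, exists_prop, not_not] at hdom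
        obtain ⟨q, hq, hqc⟩ := hdom
        have hb : ¬ bestB (ta + tb) (rowA r) ([ta, tb] :: tl) ≤ rowB r := by
          intro h
          exact (hiff.mp h).2 q hq hqc
        have hanyq : ([ta, tb] :: tl).any (fun q => decide (rowA r < rowA q) && decide (rowB r < rowB q)) = true :=
          List.any_eq_true.mpr ⟨q, hq, by simp [hqc.1, hqc.2]⟩
        simp [hsum, hb, hanyq]
    · simp [hsum]

theorem solution_changed : Claim_changed_solution := by
  unfold Claim_changed_solution; decide

theorem solution_tight : Claim_exact_solution := by
  intro scores _hdom hpre hD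
  obtain ⟨hne, hlen⟩ := hpre
  have hsh := rows_pairs scores hlen
  obtain ⟨r0, tl, rfl⟩ : ∃ r0 tl, scores = r0 :: tl := by
    cases scores with
    | nil => exact absurd rfl hne
    | cons r0 tl => exact ⟨r0, tl, rfl⟩
  obtain ⟨ta, tb, rfl⟩ := hsh _ List.mem_cons_self
  obtain ⟨h, hh, hund0, w, hw, hwsum, hwneg, hwnodom⟩ := hD
  have hh' : h = [ta, tb] := by simpa using hh
  subst hh'
  rw [rowA_pair, rowB_pair] at hwsum
  have hnod : ∀ r ∈ ([ta, tb] :: tl), ¬(ta < rowA r ∧ tb < rowB r) := by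
    intro r hr
    simpa [rowA_pair, rowB_pair] using hund0 r hr
  have hany : ([ta, tb] :: tl).any (fun r => decide (ta < rowA r) && decide (tb < rowB r)) = false := by
    rw [Bool.eq_false_iff]
    intro hc
    obtain ⟨q, hq, hqc⟩ := List.any_eq_true.mp hc
    simp only [Bool.and_eq_true, decide_eq_true_eq] at hqc
    exact hnod q hq hqc
  rw [solution_eq_count ta tb tl hsh hnod]
  rw [show solution_alt ([ta, tb] :: tl) = 1 + (([ta, tb] :: tl).countP (fun r =>
        decide (ta + tb < rowA r + rowB r) &&
        !(([ta, tb] :: tl).any (fun q => decide (rowA r < rowA q) && decide (rowB r < rowB q)))) : Int) by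
      simp only [solution_alt]; rw [if_neg (by simp [hany])]]
  have hlt : ([ta, tb] :: tl).countP (fun r =>
        decide (ta + tb < rowA r + rowB r) &&
        decide (bestB (ta + tb) (rowA r) ([ta, tb] :: tl) ≤ rowB r)) <
      ([ta, tb] :: tl).countP (fun r =>
        decide (ta + tb < rowA r + rowB r) &&
        !(([ta, tb] :: tl).any (fun q => decide (rowA r < rowA q) && decide (rowB r < rowB q)))) := by
    refine countP_lt_of_witness _ _ ([ta, tb] :: tl) ?_ ⟨w, hw, ?_, ?_⟩
    · -- A-counted implies B-counted
      intro r _ hp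
      simp only [Bool.and_eq_true, decide_eq_true_eq] at hp
      obtain ⟨hsum, hb⟩ := hp
      have hiff := bestB_le_iff (ta + tb) (rowA r) (rowB r) ([ta, tb] :: tl) hsum
      have hnoany : ([ta, tb] :: tl).any (fun q => decide (rowA r < rowA q) && decide (rowB r < rowB q)) = false := by
        rw [Bool.eq_false_iff]
        intro hc
        obtain ⟨q, hq, hqc⟩ := List.any_eq_true.mp hc
        simp only [Bool.and_eq_true, decide_eq_true_eq] at hqc
        exact (hiff.mp hb).2 q hq hqc
      simp [hsum, hnoany]
    · -- B counts the witness row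
      have hnoany : ([ta, tb] :: tl).any (fun q => decide (rowA w < rowA q) && decide (rowB w < rowB q)) = false := by
        rw [Bool.eq_false_iff]
        intro hc
        obtain ⟨q, hq, hqc⟩ := List.any_eq_true.mp hc
        simp only [Bool.and_eq_true, decide_eq_true_eq] at hqc
        exact hwnodom q hq hqc
      simp [hwsum, hnoany]
    · -- A does not: bestB ≤ rowB w would need 0 ≤ rowB w, but rowB w < 0
      have hb : ¬ bestB (ta + tb) (rowA w) ([ta, tb] :: tl) ≤ rowB w := by
        intro h
        have := (bestB_le_iff (ta + tb) (rowA w) (rowB w) ([ta, tb] :: tl) hwsum).mp h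
        omega
      simp [hwsum, hb]
  omega
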